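-- pv_equiv track=rewrite | github.com/davidrmcharles/pecunia-old | python/activity.py | _splitTransactionLine
-- ===== SOURCE A (Python) =====
-- def _splitTransactionLine(line):
--     maybeTokens = line.strip().split(',')
--
--     tokens = []
--     for maybeToken in maybeTokens:
--         if maybeToken.startswith(' ') and (len(maybeToken) > 1):
--             tokens[-1] = tokens[-1] + ',' + maybeToken
--         else:
--             tokens.append(maybeToken)
--     return tokens
-- ===== SOURCE B (Python) =====
-- def _splitTransactionLine(line):
--     s = line.strip()
--     tokens, cur = [], []
--     n = len(s)
--     for i, c in enumerate(s):
--         if c == ',' and not (i + 1 < n and s[i + 1] == ' '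
--                              and i + 2 < n and s[i + 2] != ','):
--             tokens.append(''.join(cur))
--             cur = []
--         else:
--             cur.append(c)
--     tokens.append(''.join(cur))
--     return tokens
-- ===== Notes on version B (the rewrite author's own statement) =====
-- stated objective: alternative
-- what changed: Replaced split-on-comma followed by a merge loop that re-concatenates tokens starting with a space with a single character-level scan that decides at each comma, by looking ahead at the next two characters, whether the comma separates tokens or stays inside the current one.
import Mathlib
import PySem

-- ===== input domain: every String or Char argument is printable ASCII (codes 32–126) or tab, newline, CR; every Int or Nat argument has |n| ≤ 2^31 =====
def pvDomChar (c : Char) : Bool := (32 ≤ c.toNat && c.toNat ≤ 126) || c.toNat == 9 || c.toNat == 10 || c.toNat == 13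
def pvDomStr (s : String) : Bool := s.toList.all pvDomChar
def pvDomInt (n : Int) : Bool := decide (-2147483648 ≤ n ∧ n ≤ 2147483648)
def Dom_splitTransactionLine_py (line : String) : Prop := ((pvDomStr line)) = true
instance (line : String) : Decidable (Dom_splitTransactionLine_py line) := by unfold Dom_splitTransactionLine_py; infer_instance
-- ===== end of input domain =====

-- B replaces A's split-then-merge with a single character-level scan with two-char lookahead (alternative algorithm, same cost).

set_option maxRecDepth 8192


-- ===== PORT A =====
-- A's merge test: maybeToken.startswith(' ') and len(maybeToken) > 1
def mergeCond (t : List Char) : Bool :=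
  PySem.Chars.startswith t [' '] && decide (1 < PySem.Chars.len t)

-- one fold step: 'if <mergeCond>: tokens[-1] = tokens[-1] + "," + maybeToken else: tokens.append(maybeToken)'
-- (tokens[-1] on empty tokens would raise IndexError in Python, but that branch is unreachable:
--  after strip() the first token never starts with a space; the getD default is never used)
def pyAStep (tokens : List (List Char)) (t : List Char) : List (List Char) :=
  if mergeCond t then
    tokens.dropLast ++ [(tokens.getLast?).getD [] ++ [','] ++ t]
  else
    tokens ++ [t]

def splitTransactionLine_py (line : String) : List String :=
  -- maybeTokens = line.strip().split(','); then the for-loop over maybeTokens is the foldl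
  ((PySem.Chars.splitOn (PySem.Chars.strip line.toList) [',']).foldl pyAStep []).map String.ofList

-- ===== PORT B =====
-- B's lookahead at a comma: the comma stays inside the current token iff it is followed
-- by a space and then at least one more character that is not a comma
def keepComma (rest : List Char) : Bool :=
  match rest with
  | d1 :: d2 :: _ => decide (d1 = ' ') && decide (d2 ≠ ',')
  | _ => false

-- single scan: at each character, a comma that is not kept flushes the current token,
-- every other character is pushed onto the current token
def bscan : List Char → List Char → List (List Char)
  | [], cur => [cur.reverse]
  | c :: rest, cur =>
      if c = ',' && !keepComma rest then cur.reverse :: bscan rest []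
      else bscan rest (c :: cur)

def splitTransactionLine_py_alt (line : String) : List String :=
  (bscan (PySem.Chars.strip line.toList) []).map String.ofList

-- ===== PRECONDITION & SPEC =====
def Spec_splitTransactionLine_py (line : String) (out : List String) : Prop := out = splitTransactionLine_py_alt line
instance (line : String) (out : List String) : Decidable (Spec_splitTransactionLine_py line out) := by unfold Spec_splitTransactionLine_py; infer_instance

-- ===== CLAIM (what is proved, stated in full; the proofs are below) =====
def Claim_equal_splitTransactionLine_py : Prop := ∀ (line : String), Dom_splitTransactionLine_py line → Spec_splitTransactionLine_py line (splitTransactionLine_py line)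

-- ===== LEMMAS AND PROOFS =====

-- simple structural split on ',' (proved equal to PySem.Chars.splitOn · [','] below)
def splitC : List Char → List (List Char)
  | [] => [[]]
  | c :: r =>
      if c = ',' then [] :: splitC r
      else match splitC r with
           | [] => [[c]]
           | p :: ps => (c :: p) :: ps

-- head-recursive reformulation of A's fold
def glue : List Char → List (List Char) → List (List Char)
  | cur, [] => [cur]
  | cur, t :: ts => if mergeCond t then glue (cur ++ ',' :: t) ts else cur :: glue t ts

theorem splitC_ne_nil (l : List Char) : splitC l ≠ [] := by
  cases l with
  | nil => simp [splitC]
  | cons c r =>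
    simp only [splitC]
    split
    · simp
    · split <;> simp

theorem splitC_cons (l : List Char) : ∃ p ps, splitC l = p :: ps := by
  cases h : splitC l with
  | nil => exact absurd h (splitC_ne_nil l)
  | cons p ps => exact ⟨p, ps, rfl⟩

theorem splitOn_go_comma (fuel : Nat) (l cur : List Char) (acc : List (List Char))
    (h : l.length ≤ fuel) :
    PySem.Chars.splitOn.go [','] fuel l cur acc =
      acc.reverse ++ (match splitC l with
                      | [] => [cur.reverse]
                      | p :: ps => (cur.reverse ++ p) :: ps) := by
  induction fuel generalizing l cur acc with
  | zero =>
    have : l = [] := List.length_eq_zero_iff.mp (Nat.le_zero.mp h)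
    subst this
    simp [PySem.Chars.splitOn.go, splitC]
  | succ fuel ih =>
    cases l with
    | nil => simp [PySem.Chars.splitOn.go, splitC]
    | cons c rest =>
      simp only [PySem.Chars.splitOn.go]
      by_cases hc : c = ','
      · subst hc
        rw [if_pos (by simp [List.isPrefixOf])]
        simp only [List.length_cons, List.length_nil, List.drop_succ_cons, List.drop_zero]
        rw [ih rest [] (cur.reverse :: acc) (by simpa using Nat.le_of_succ_le_succ h)]
        simp only [splitC]
        obtain ⟨p, ps, hsp⟩ := splitC_cons rest
        rw [hsp]
        simp
      · rw [if_neg (by simp [List.isPrefixOf, Ne.symm hc])]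
        rw [ih rest (c :: cur) acc (by simpa using Nat.le_of_succ_le_succ h)]
        simp only [splitC, if_neg hc]
        obtain ⟨p, ps, hsp⟩ := splitC_cons rest
        rw [hsp]
        simp

theorem splitOn_comma (l : List Char) : PySem.Chars.splitOn l [','] = splitC l := by
  show PySem.Chars.splitOn.go [','] (l.length + 1) l [] [] = splitC l
  rw [splitOn_go_comma (l.length + 1) l [] [] (Nat.le_succ _)]
  obtain ⟨p, ps, hsp⟩ := splitC_cons l
  simp [hsp]

-- A's merge test on the token after a comma = B's lookahead at that comma
theorem mergeCond_eq_keepComma (rest p : List Char) (ps : List (List Char))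
    (hsp : splitC rest = p :: ps) : mergeCond p = keepComma rest := by
  cases rest with
  | nil =>
    simp only [splitC] at hsp
    obtain ⟨rfl, -⟩ : p = [] ∧ ps = [] := by simpa using hsp.symm
    simp [mergeCond, keepComma, PySem.Chars.startswith, List.isPrefixOf]
  | cons d1 r1 =>
    by_cases hd1 : d1 = ','
    · subst hd1
      simp only [splitC] at hsp
      have hp : p = [] := by simpa using congrArg List.head? hsp.symm
      cases r1 <;>
        simp [mergeCond, keepComma, hp, PySem.Chars.startswith]
    · simp only [splitC, if_neg hd1] at hsp
      obtain ⟨p', ps', hsp'⟩ := splitC_cons r1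
      rw [hsp'] at hsp
      have hp : p = d1 :: p' := by simpa using congrArg List.head? hsp.symm
      cases r1 with
      | nil =>
        have hp' : p' = [] := by simpa [splitC] using congrArg List.head? hsp'.symm
        by_cases h1 : d1 = ' ' <;>
          simp [mergeCond, keepComma, hp, hp', h1, PySem.Chars.startswith, List.isPrefixOf,
            PySem.Chars.len]
      | cons d2 r2 =>
        by_cases h2 : d2 = ','
        · subst h2
          have hp' : p' = [] := by
            simp only [splitC] at hsp'
            simpa using congrArg List.head? hsp'.symm
          by_cases h1 : d1 = ' ' <;>
            simp [mergeCond, keepComma, hp, hp', h1, PySem.Chars.startswith, List.isPrefixOf,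
              PySem.Chars.len]
        · have hp' : ∃ q, p' = d2 :: q := by
            simp only [splitC, if_neg h2] at hsp'
            obtain ⟨a, b, hab⟩ := splitC_cons r2
            rw [hab] at hsp'
            exact ⟨a, by simpa using congrArg List.head? hsp'.symm⟩
          obtain ⟨q, hq⟩ := hp'
          by_cases h1 : d1 = ' '
          · simp [mergeCond, keepComma, hp, hq, h1, h2, PySem.Chars.startswith,
              List.isPrefixOf, PySem.Chars.len]
          · simp [mergeCond, keepComma, hp, hq, h2, PySem.Chars.startswith,
              List.isPrefixOf, PySem.Chars.len, beq_eq_decide, Ne.symm h1, h1]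

-- A's foldl with a nonempty accumulator equals glue
theorem foldl_pyAStep_glue (ts : List (List Char)) (init : List (List Char)) (cur : List Char) :
    List.foldl pyAStep (init ++ [cur]) ts = init ++ glue cur ts := by
  induction ts generalizing init cur with
  | nil => simp [glue]
  | cons t ts ih =>
    simp only [List.foldl_cons, glue]
    by_cases hm : mergeCond t = true
    · have hstep : pyAStep (init ++ [cur]) t = init ++ [cur ++ ',' :: t] := by
        unfold pyAStep
        rw [if_pos hm]
        simp
      rw [hstep, if_pos hm, ih]
    · have hstep : pyAStep (init ++ [cur]) t = (init ++ [cur]) ++ [t] := by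
        unfold pyAStep
        rw [if_neg hm]
      rw [hstep, if_neg hm, ih (init ++ [cur]) t]
      simp
-- B's scan equals glue over the structural split
theorem bscan_glue (l : List Char) (cur : List Char) :
    bscan l cur =
      (match splitC l with
       | [] => [cur.reverse]
       | p :: ps => glue (cur.reverse ++ p) ps) := by
  induction l generalizing cur with
  | nil => simp [bscan, splitC, glue]
  | cons c rest ih =>
    by_cases hc : c = ','
    · subst hc
      simp only [splitC]
      obtain ⟨p, ps, hsp⟩ := splitC_cons rest
      rw [hsp]
      have hmk := mergeCond_eq_keepComma rest p ps hsp
      by_cases hk : keepComma rest = true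
      · have hbs : bscan (',' :: rest) cur = bscan rest (',' :: cur) := by
          simp [bscan, hk]
        rw [hbs, ih (',' :: cur), hsp]
        simp [glue, hmk.trans hk]
      · have hk' : keepComma rest = false := Bool.eq_false_iff.mpr hk
        have hbs : bscan (',' :: rest) cur = cur.reverse :: bscan rest [] := by
          simp [bscan, hk']
        rw [hbs, ih [], hsp]
        simp [glue, hmk.trans hk']
    · have hbs : bscan (c :: rest) cur = bscan rest (c :: cur) := by
        simp [bscan, hc]
      rw [hbs, ih (c :: cur)]
      simp only [splitC, if_neg hc]
      obtain ⟨p, ps, hsp⟩ := splitC_cons rest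
      rw [hsp]
      simp

-- the head of strip's output is never a space character
theorem strip_head_not_space (s : List Char) (c : Char) (r : List Char)
    (h : PySem.Chars.strip s = c :: r) : PySem.Chars.isspace c = false := by
  unfold PySem.Chars.strip PySem.Chars.rstrip PySem.Chars.lstrip at h
  set l := List.dropWhile PySem.Chars.isspace s with hl
  have hpre : (c :: r) <+: l := by
    rw [← h]
    have hsuf : List.dropWhile PySem.Chars.isspace l.reverse <:+ l.reverse :=
      List.dropWhile_suffix _
    have h3 := List.reverse_prefix.mpr hsuf
    rw [List.reverse_reverse] at h3
    exact h3
  obtain ⟨t, ht⟩ := hpre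
  have hl2 : List.dropWhile PySem.Chars.isspace s = c :: (r ++ t) := by rw [← hl, ← ht]; simp
  have hne : List.dropWhile PySem.Chars.isspace s ≠ [] := by simp [hl2]
  have h2 := List.head_dropWhile_not PySem.Chars.isspace (l := s) hne
  simp only [hl2, List.head_cons] at h2
  exact h2

-- ===== VERDICT (by name: the statement is the Claim_ definition above) =====
theorem splitTransactionLine_py_spec : Claim_equal_splitTransactionLine_py := by
  intro line _
  unfold Spec_splitTransactionLine_py splitTransactionLine_py splitTransactionLine_py_alt
  set st := PySem.Chars.strip line.toList with hst
  rw [splitOn_comma]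
  obtain ⟨p, ps, hsp⟩ := splitC_cons st
  have hmk := mergeCond_eq_keepComma st p ps hsp
  have hm : mergeCond p = false := by
    rw [hmk]
    cases hcase : st with
    | nil => simp [keepComma]
    | cons d1 r1 =>
      cases r1 with
      | nil => simp [keepComma]
      | cons d2 r2 =>
        have hcs : PySem.Chars.isspace d1 = false :=
          strip_head_not_space line.toList d1 (d2 :: r2) (by rw [← hst, hcase])
        have : d1 ≠ ' ' := by rintro rfl; simp [PySem.Chars.isspace] at hcs
        simp [keepComma, this]
  rw [hsp]
  have hfold : List.foldl pyAStep [] (p :: ps) = glue p ps := by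
    have hstep : pyAStep [] p = [] ++ [p] := by
      unfold pyAStep
      rw [if_neg (by simp [hm])]
    simp only [List.foldl_cons, hstep]
    simpa using foldl_pyAStep_glue ps [] p
  have hb : bscan st [] = glue p ps := by
    rw [bscan_glue st []]
    simp [hsp]
  rw [hfold, hb]
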